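-- pv_equiv track=rewrite | github.com/philmayes/midi_maker | midi.py | make_error_table
-- ===== SOURCE A (Python) =====
-- def make_error_table(amount: int) -> list[int]:
--     """Makes an error table
--     Maximum error == ±<amount>.
--     Smaller errors are more probable.
--     """
--     table = []
--     for err in range(amount + 1):
--         for no in range(-err, err + 1):
--             table.append(no)
--     amount //= 2
--     if amount > 0:
--         table.extend(make_error_table(amount))
--     return table
-- ===== SOURCE B (Python) =====
-- def make_error_table(amount: int) -> list[int]:
--     """Makes an error table
--     Maximum error == ±<amount>.
--     Smaller errors are more probable.
--     """
--     table = []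
--     a = amount
--     while True:
--         for err in range(a + 1):
--             table.extend(range(-err, err + 1))
--         a //= 2
--         if a <= 0:
--             break
--     return table
-- ===== Notes on version B (the rewrite author's own statement) =====
-- stated objective: simpler
-- what changed: Replaces the tail recursion (which rebuilds and concatenates each halved level's list via a recursive call) by a single iterative while-loop with an accumulator that halves the amount in place and extends the table level by level.
import Mathlib
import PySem

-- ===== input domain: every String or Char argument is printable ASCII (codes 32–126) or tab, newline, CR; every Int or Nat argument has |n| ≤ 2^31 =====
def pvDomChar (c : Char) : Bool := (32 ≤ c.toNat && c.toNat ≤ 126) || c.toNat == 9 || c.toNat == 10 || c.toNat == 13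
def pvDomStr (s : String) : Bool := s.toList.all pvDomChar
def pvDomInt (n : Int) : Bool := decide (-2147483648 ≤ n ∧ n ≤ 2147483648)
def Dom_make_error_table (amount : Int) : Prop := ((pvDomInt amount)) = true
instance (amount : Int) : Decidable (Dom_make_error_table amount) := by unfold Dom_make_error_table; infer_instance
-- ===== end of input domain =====

-- B replaces A's tail recursion by an iterative accumulator loop that halves the amount in place; objective: simpler.

-- ===== PORT A =====
-- recursion decreases amount.toNat: amount//2 > 0 forces amount//2 < amount
theorem pvHalfLt (a : Int) (h : 0 < PySem.Int.floordiv a 2) :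
    (PySem.Int.floordiv a 2).toNat < a.toNat := by
  rw [PySem.Int.floordiv_eq_ediv_of_pos (by omega)] at h ⊢
  omega

def make_error_table (amount : Int) : List Int :=
  let table := (PySem.List.pyRange 0 (amount + 1) 1).foldl
    (fun t err => (PySem.List.pyRange (-err) (err + 1) 1).foldl (fun t no => t ++ [no]) t) []
  let amount' := PySem.Int.floordiv amount 2
  if h : 0 < amount' then table ++ make_error_table amount' else table
termination_by amount.toNat
decreasing_by exact pvHalfLt amount h

-- ===== PORT B =====
-- the while-True loop of Source B: extend table with the current level, halve a, stop when a <= 0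
def pvAltLoop (a : Int) (table : List Int) : List Int :=
  let table := (PySem.List.pyRange 0 (a + 1) 1).foldl
    (fun t err => t ++ PySem.List.pyRange (-err) (err + 1) 1) table
  let a' := PySem.Int.floordiv a 2
  if h : a' ≤ 0 then table else pvAltLoop a' table
termination_by a.toNat
decreasing_by exact pvHalfLt a (by omega)

def make_error_table_alt (amount : Int) : List Int := pvAltLoop amount []

-- ===== PRECONDITION & SPEC =====
def Spec_make_error_table (amount : Int) (out : List Int) : Prop := out = make_error_table_alt amount
instance (amount : Int) (out : List Int) : Decidable (Spec_make_error_table amount out) := by unfold Spec_make_error_table; infer_instance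

-- ===== CLAIM (what is proved, stated in full; the proofs are below) =====
def Claim_equal_make_error_table : Prop := ∀ (amount : Int), Dom_make_error_table amount → Spec_make_error_table amount (make_error_table amount)

-- ===== LEMMAS AND PROOFS =====

-- the two level builders agree, and B's starts from an arbitrary accumulator
theorem pvLevel_eq (a : Int) (t : List Int) :
    (PySem.List.pyRange 0 (a + 1) 1).foldl
      (fun t err => t ++ PySem.List.pyRange (-err) (err + 1) 1) t
    = t ++ (PySem.List.pyRange 0 (a + 1) 1).foldl
      (fun t err => (PySem.List.pyRange (-err) (err + 1) 1).foldl (fun t no => t ++ [no]) t) [] := by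
  have hstep : ∀ (t : List Int) (err : Int),
      (PySem.List.pyRange (-err) (err + 1) 1).foldl (fun t no => t ++ [no]) t
      = t ++ PySem.List.pyRange (-err) (err + 1) 1 := by
    intro t err; exact PySem.List.foldl_append_singleton _ t
  induction (PySem.List.pyRange 0 (a + 1) 1) generalizing t with
  | nil => simp
  | cons x xs ih =>
    simp only [List.foldl_cons, hstep]
    rw [ih (t ++ _), ih (([] : List Int) ++ _)]
    simp

theorem pvLoop_eq (a : Int) (t : List Int) : pvAltLoop a t = t ++ make_error_table a := by
  rw [pvAltLoop, make_error_table]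
  simp only [pvLevel_eq]
  split
  · next h =>
    rw [dif_neg (by omega)]
  · next h =>
    rw [dif_pos (by omega), pvLoop_eq (PySem.Int.floordiv a 2)]
    simp
termination_by a.toNat
decreasing_by exact pvHalfLt a (by omega)

-- ===== VERDICT (by name: the statement is the Claim_ definition above) =====
theorem make_error_table_spec : Claim_equal_make_error_table := by
  intro amount _
  unfold Spec_make_error_table make_error_table_alt
  rw [pvLoop_eq]
  simp
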